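-- pv_equiv track=rewrite | github.com/chl19940220/agent_learning | zhihu_blog/convert_to_zhihu.py | adapt_formulas
-- ===== SOURCE A (Python) =====
-- def adapt_formulas(content: str) -> str:
--     """
--     适配知乎的公式格式。
--     知乎支持 $...$ 行内公式和 $$...$$ 块公式。
--     主要处理：
--     1. 确保块公式前后有空行（知乎要求）
--     2. 表格内的 $ 公式保持不变（知乎表格内公式支持有限，但基本可用）
--     """
--     lines = content.split('\n')
--     result = []
--     i = 0
--     while i < len(lines):
--         line = lines[i]
--         # 确保 $$ 块公式前后有空行
--         if line.strip().startswith('$$') and not line.strip().startswith('$$$'):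
--             # 如果前一行不是空行，加空行
--             if result and result[-1].strip() != '':
--                 result.append('')
--             result.append(line)
--             # 如果这行只有 $$（开始标记），找到结束的 $$
--             if line.strip() == '$$':
--                 i += 1
--                 while i < len(lines):
--                     result.append(lines[i])
--                     if lines[i].strip() == '$$':
--                         break
--                     i += 1
--             # 确保块公式后有空行
--             if i + 1 < len(lines) and lines[i + 1].strip() != '':
--                 result.append('')
--         else:
--             result.append(line)
--         i += 1
--     return '\n'.join(result)
-- ===== SOURCE B (Python) =====
-- def adapt_formulas(content: str) -> str:
--     """Same formatting pass, as a single loop with an explicit in_block flag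
--     instead of an outer loop with a nested inner while."""
--     lines = content.split('\n')
--     result = []
--     in_block = False
--     for i, line in enumerate(lines):
--         s = line.strip()
--         if in_block:
--             result.append(line)
--             if s == '$$':
--                 in_block = False
--                 if i + 1 < len(lines) and lines[i + 1].strip() != '':
--                     result.append('')
--         elif s.startswith('$$') and not s.startswith('$$$'):
--             if result and result[-1].strip() != '':
--                 result.append('')
--             result.append(line)
--             if s == '$$':
--                 in_block = True
--             elif i + 1 < len(lines) and lines[i + 1].strip() != '':
--                 result.append('')
--         else:
--             result.append(line)
--     return '\n'.join(result)
-- ===== Notes on version B (the rewrite author's own statement) =====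
-- stated objective: simpler
-- what changed: Replaces the outer while-loop with a nested inner while (which re-scans and mutates the shared index inside the body) by one flat pass over enumerate(lines) carrying an in_block boolean state flag.
import Mathlib
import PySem

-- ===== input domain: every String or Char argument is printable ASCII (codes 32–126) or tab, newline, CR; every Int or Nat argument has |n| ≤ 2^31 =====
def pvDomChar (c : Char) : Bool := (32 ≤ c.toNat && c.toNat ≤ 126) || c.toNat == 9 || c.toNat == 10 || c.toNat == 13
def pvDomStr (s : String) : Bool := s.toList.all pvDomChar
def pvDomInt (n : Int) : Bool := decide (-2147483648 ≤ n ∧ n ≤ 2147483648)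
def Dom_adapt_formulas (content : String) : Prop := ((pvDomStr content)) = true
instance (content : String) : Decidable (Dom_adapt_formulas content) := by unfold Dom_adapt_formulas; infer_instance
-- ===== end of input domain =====

-- B replaces A's outer-while-plus-nested-inner-while by one flat pass with an in_block flag (objective: simpler).

-- ===== PORT A =====

-- inner while of A: 'while i < len(lines): result.append(lines[i]); if lines[i].strip()=='$$': break; i += 1'
-- returns the lines remaining AFTER the line the loop stopped on (i.e. after index i), plus the grown result
def pvAInner : List String → List String → List String × List String
  | [], result => ([], result)
  | l :: ls, result =>
      if PySem.Str.strip l = "$$" then (ls, result ++ [l])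
      else pvAInner ls (result ++ [l])

theorem pvAInner_len_le : ∀ (ls result : List String), (pvAInner ls result).1.length ≤ ls.length := by
  intro ls
  induction ls with
  | nil => intro r; simp [pvAInner]
  | cons l ls ih =>
      intro r
      simp only [pvAInner]
      split
      · simp
      · exact Nat.le_succ_of_le (ih _)

-- outer while of A, over the list of lines
def pvAOuter : List String → List String → List String
  | [], result => result
  | line :: rest, result =>
      let s := PySem.Str.strip line
      if PySem.Str.startswith s "$$" && !(PySem.Str.startswith s "$$$") then
        let result := if result ≠ [] ∧ PySem.Str.strip (result.getLast!) ≠ "" then result ++ [""] else result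
        let result := result ++ [line]
        let p := if s = "$$" then pvAInner rest result else (rest, result)
        let result := match p.1 with
          | next :: _ => if PySem.Str.strip next ≠ "" then p.2 ++ [""] else p.2
          | [] => p.2
        pvAOuter p.1 result
      else pvAOuter rest (result ++ [line])
  termination_by ls _ => ls.length
  decreasing_by
  · split
    · exact Nat.lt_succ_of_le (pvAInner_len_le _ _)
    · exact Nat.lt_succ_of_le (Nat.le_refl _)
  · exact Nat.lt_succ_of_le (Nat.le_refl _)

def adapt_formulas (content : String) : String :=
  PySem.Str.join "\n" (pvAOuter ((PySem.Str.split? content "\n").getD []) [])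

-- ===== PORT B =====

-- B's single pass carrying the in_block flag
def pvBLoop : List String → Bool → List String → List String
  | [], _, result => result
  | line :: rest, inBlock, result =>
      let s := PySem.Str.strip line
      if inBlock then
        let result := result ++ [line]
        if s = "$$" then
          let result := match rest with
            | next :: _ => if PySem.Str.strip next ≠ "" then result ++ [""] else result
            | [] => result
          pvBLoop rest false result
        else pvBLoop rest true result
      else if PySem.Str.startswith s "$$" && !(PySem.Str.startswith s "$$$") then
        let result := if result ≠ [] ∧ PySem.Str.strip (result.getLast!) ≠ "" then result ++ [""] else result
        let result := result ++ [line]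
        if s = "$$" then pvBLoop rest true result
        else
          let result := match rest with
            | next :: _ => if PySem.Str.strip next ≠ "" then result ++ [""] else result
            | [] => result
          pvBLoop rest false result
      else pvBLoop rest false (result ++ [line])

def adapt_formulas_alt (content : String) : String :=
  PySem.Str.join "\n" (pvBLoop ((PySem.Str.split? content "\n").getD []) false [])

-- ===== PRECONDITION & SPEC =====
def Spec_adapt_formulas (content : String) (out : String) : Prop := out = adapt_formulas_alt content
instance (content : String) (out : String) : Decidable (Spec_adapt_formulas content out) := by unfold Spec_adapt_formulas; infer_instance

-- ===== CLAIM (what is proved, stated in full; the proofs are below) =====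
def Claim_equal_adapt_formulas : Prop := ∀ (content : String), Dom_adapt_formulas content → Spec_adapt_formulas content (adapt_formulas content)

-- ===== LEMMAS AND PROOFS =====

-- B's in_block state simulates A's inner while: running B with the flag set equals
-- finishing A's inner loop, adding the blank-after line, and resuming with the flag cleared.
theorem pvBLoop_true_eq : ∀ (ls result : List String),
    pvBLoop ls true result =
      pvBLoop (pvAInner ls result).1 false
        (match (pvAInner ls result).1 with
          | next :: _ => if PySem.Str.strip next ≠ "" then (pvAInner ls result).2 ++ [""] else (pvAInner ls result).2
          | [] => (pvAInner ls result).2) := by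
  intro ls
  induction ls with
  | nil => intro r; simp [pvBLoop, pvAInner]
  | cons l ls ih =>
      intro r
      by_cases hsl : PySem.Str.strip l = "$$"
      · simp [pvBLoop, pvAInner, hsl]
      · simp only [pvBLoop, pvAInner, if_neg hsl]
        exact ih (r ++ [l])

theorem pvAOuter_eq_pvBLoop : ∀ (n : Nat) (ls : List String), ls.length ≤ n →
    ∀ (result : List String), pvAOuter ls result = pvBLoop ls false result := by
  intro n
  induction n with
  | zero =>
      intro ls h r
      have : ls = [] := List.eq_nil_of_length_eq_zero (Nat.le_zero.mp h)
      subst this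
      simp [pvAOuter, pvBLoop]
  | succ n ih =>
      intro ls h r
      match ls with
      | [] => simp [pvAOuter, pvBLoop]
      | line :: rest =>
          have hr : rest.length ≤ n := by simp at h; omega
          by_cases hop : (PySem.Str.startswith (PySem.Str.strip line) "$$" && !PySem.Str.startswith (PySem.Str.strip line) "$$$") = true
          · by_cases hs : PySem.Str.strip line = "$$"
            · simp only [pvAOuter, pvBLoop, hs, if_true, Bool.false_eq_true, if_false]
              rw [pvBLoop_true_eq]
              exact ih _ (Nat.le_trans (pvAInner_len_le _ _) hr) _
            · simp only [pvAOuter, pvBLoop, hop, if_neg hs, if_true, Bool.false_eq_true, if_false]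
              exact ih _ hr _
          · simp only [pvAOuter, pvBLoop, if_neg hop, Bool.false_eq_true, if_false]
            exact ih _ hr _

-- ===== VERDICT (by name: the statement is the Claim_ definition above) =====
theorem adapt_formulas_spec : Claim_equal_adapt_formulas := by
  intro content _
  unfold Spec_adapt_formulas adapt_formulas adapt_formulas_alt
  rw [pvAOuter_eq_pvBLoop ((PySem.Str.split? content "\n").getD []).length _ (Nat.le_refl _)]
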